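-- pv_equiv track=rewrite | github.com/lauwong/6009labs | lab05/lab.py | check_contradiction
-- ===== SOURCE A (Python) =====
-- def check_contradiction(formula):
--     """
--     Checks the CNF for a contradiction between unit clauses
--
--     Parameters:
--         * formula (list) : the CNF to check
--
--     Returns:
--         A boolean that is True if there is a contradiction, otherwise False
--     """
--     required_literals = {}
--     for clause in formula:
--         if len(clause) == 1:
--             item = clause[0][0]
--             # If the variable has been encountered before but its value
--             # was the opposite, there is a contradiction
--             if item in required_literals:
--                 if required_literals[item] != clause[0][1]:
--                     return True
--             else: # Keep track of the new variable and value
--                 required_literals[item] = clause[0][1]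
--     return False
-- ===== SOURCE B (Python) =====
-- def check_contradiction(formula):
--     """
--     Checks the CNF for a contradiction between unit clauses.
--
--     A contradiction exists exactly when some variable occurs in unit
--     clauses with two distinct truth values, i.e. when the set of
--     (variable, value) unit pairs is strictly larger than the set of
--     unit variables.
--     """
--     pairs = {(clause[0][0], clause[0][1]) for clause in formula if len(clause) == 1}
--     variables = {p[0] for p in pairs}
--     return len(pairs) != len(variables)
-- ===== Notes on version B (the rewrite author's own statement) =====
-- stated objective: simpler
-- what changed: Replaces the stateful first-conflict dict scan with one comprehension collecting all unit (variable, value) pairs into a set and a cardinality comparison |pairs| != |variables|.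
import Mathlib
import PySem

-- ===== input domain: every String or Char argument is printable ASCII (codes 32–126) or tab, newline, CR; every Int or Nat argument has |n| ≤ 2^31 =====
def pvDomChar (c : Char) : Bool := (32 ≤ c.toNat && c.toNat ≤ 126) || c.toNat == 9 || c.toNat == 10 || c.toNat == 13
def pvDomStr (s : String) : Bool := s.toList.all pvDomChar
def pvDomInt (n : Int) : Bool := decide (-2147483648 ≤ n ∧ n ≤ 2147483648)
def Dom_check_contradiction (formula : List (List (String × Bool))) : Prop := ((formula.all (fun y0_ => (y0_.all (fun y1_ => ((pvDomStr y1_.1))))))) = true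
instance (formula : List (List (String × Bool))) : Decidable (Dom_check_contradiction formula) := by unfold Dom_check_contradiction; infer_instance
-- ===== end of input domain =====

-- B replaces A's stateful first-conflict dict scan by collecting the unit (variable, value)
-- pairs into a set and comparing its cardinality with that of the set of unit variables (simpler).


-- ===== PORT A =====
-- loop over the clauses, carrying A's dict 'required_literals'; clause[0] is pyGetD clause 0
def check_contradiction_go (d : PySem.Dict String Bool) :
    List (List (String × Bool)) → Bool
  | [] => false
  | clause :: rest =>
    if clause.length = 1 then
      let item := (PySem.List.pyGetD clause 0 ("", false)).1
      match d.get? item with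
      | some v =>
        if v != (PySem.List.pyGetD clause 0 ("", false)).2 then true
        else check_contradiction_go d rest
      | none =>
        check_contradiction_go (d.insert item (PySem.List.pyGetD clause 0 ("", false)).2) rest
    else check_contradiction_go d rest

def check_contradiction (formula : List (List (String × Bool))) : Bool :=
  check_contradiction_go PySem.Dict.empty formula

-- ===== PORT B =====
def check_contradiction_alt (formula : List (List (String × Bool))) : Bool :=
  let pairs : PySem.Set (String × Bool) :=
    PySem.Set.ofList (formula.filterMap (fun clause =>
      if clause.length = 1 then some (PySem.List.pyGetD clause 0 ("", false)) else none))
  let vars_ : PySem.Set String := PySem.Set.ofList (pairs.map Prod.fst)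
  pairs.length != vars_.length

-- ===== PRECONDITION & SPEC =====
def Spec_check_contradiction (formula : List (List (String × Bool))) (out : Bool) : Prop := out = check_contradiction_alt formula
instance (formula : List (List (String × Bool))) (out : Bool) : Decidable (Spec_check_contradiction formula out) := by unfold Spec_check_contradiction; infer_instance

-- ===== CLAIM (what is proved, stated in full; the proofs are below) =====
def Claim_equal_check_contradiction : Prop := ∀ (formula : List (List (String × Bool))), Dom_check_contradiction formula → Spec_check_contradiction formula (check_contradiction formula)

-- ===== LEMMAS AND PROOFS =====

-- the unit-clause pairs of a formula, in order
def unitsOf (formula : List (List (String × Bool))) : List (String × Bool) :=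
  formula.filterMap (fun clause =>
    if clause.length = 1 then some (PySem.List.pyGetD clause 0 ("", false)) else none)

-- PySem.Set.ofList keeps a subsequence of its argument
theorem ofList_sublist {α : Type} [BEq α] [LawfulBEq α] (m : List α) :
    (PySem.Set.ofList m).Sublist m := by
  induction m using List.reverseRecOn with
  | nil => simp [PySem.Set.ofList_nil]
  | append_singleton xs x ih =>
    rw [PySem.Set.ofList_append_singleton, PySem.Set.add_eq_ite]
    split
    · exact ih.trans (List.sublist_append_left xs [x])
    · exact ih.append (List.Sublist.refl [x])

-- deduplication preserves the length exactly for duplicate-free lists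
theorem length_ofList_eq_iff {α : Type} [BEq α] [LawfulBEq α] (m : List α) :
    (PySem.Set.ofList m).length = m.length ↔ m.Nodup := by
  constructor
  · intro h
    rw [← (ofList_sublist m).eq_of_length h]
    exact PySem.Set.nodup_ofList m
  · intro h
    exact congrArg List.length (PySem.Set.ofList_eq_self_of_nodup m h)

-- for a duplicate-free list of (variable, Bool) pairs, the variables repeat
-- exactly when some variable occurs with both Boolean values
theorem nodup_map_fst_iff (l : List (String × Bool)) (hl : l.Nodup) :
    (l.map Prod.fst).Nodup ↔ ¬ ∃ p ∈ l, (p.1, !p.2) ∈ l := by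
  rw [List.Nodup, List.pairwise_map]
  constructor
  · rintro h ⟨p, hp, hq⟩
    have hne : p ≠ (p.1, !p.2) := by
      intro e
      have := congrArg Prod.snd e
      simp at this
    exact (h.forall (fun a b hab => hab.symm) hp hq hne) rfl
  · intro h
    refine hl.imp_of_mem ?_
    intro a b ha hb hab hfst
    apply h
    have hb' : b = (a.1, !a.2) := by
      have hsnd : b.2 ≠ a.2 := by
        intro e
        exact hab (Prod.ext hfst.symm e).symm
      cases ha2 : a.2 <;> cases hb2 : b.2 <;>
        simp_all [Prod.ext_iff]
    exact ⟨a, ha, hb' ▸ hb⟩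

-- characterisation of B
theorem alt_iff (formula : List (List (String × Bool))) :
    check_contradiction_alt formula = true ↔
      ∃ p ∈ unitsOf formula, (p.1, !p.2) ∈ unitsOf formula := by
  unfold check_contradiction_alt
  rw [show (formula.filterMap (fun clause =>
      if clause.length = 1 then some (PySem.List.pyGetD clause 0 ("", false)) else none))
      = unitsOf formula from rfl]
  set pairs := PySem.Set.ofList (unitsOf formula) with hpairs
  have hnd : pairs.Nodup := PySem.Set.nodup_ofList _
  simp only [bne_iff_ne, ne_eq]
  constructor
  · intro h
    have : ¬ (pairs.map Prod.fst).Nodup := by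
      intro hnodup
      exact h (by rw [length_ofList_eq_iff _ |>.mpr hnodup, List.length_map])
    obtain ⟨p, hp, hq⟩ := not_not.mp (mt (nodup_map_fst_iff pairs hnd).mpr (by simpa using this))
    exact ⟨p, (PySem.Set.mem_ofList _ _).mp hp, (PySem.Set.mem_ofList _ _).mp hq⟩
  · rintro ⟨p, hp, hq⟩ hlen
    have hnodup : (pairs.map Prod.fst).Nodup := by
      rw [← length_ofList_eq_iff]
      rw [List.length_map]
      exact hlen.symm
    exact (nodup_map_fst_iff pairs hnd).mp hnodup
      ⟨p, (PySem.Set.mem_ofList _ _).mpr hp, (PySem.Set.mem_ofList _ _).mpr hq⟩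

-- invariant of A's loop: a contradiction is found iff some unit pair is
-- contradicted by a later unit pair or by the dict carried so far
theorem go_iff (fs : List (List (String × Bool))) :
    ∀ (d : PySem.Dict String Bool),
      check_contradiction_go d fs = true ↔
        ∃ p ∈ unitsOf fs, ((p.1, !p.2) ∈ unitsOf fs ∨ d.get? p.1 = some (!p.2)) := by
  induction fs with
  | nil => intro d; simp [check_contradiction_go, unitsOf]
  | cons c rest ih =>
    intro d
    by_cases hc : c.length = 1
    · obtain ⟨q, rfl⟩ : ∃ q, c = [q] := by
        match c, hc with
        | [q], _ => exact ⟨q, rfl⟩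
      have hU : unitsOf ([q] :: rest) = q :: unitsOf rest := by
        simp [unitsOf, PySem.List.pyGetD_zero_cons]
      rw [hU]
      simp only [check_contradiction_go, if_pos hc, PySem.List.pyGetD_zero_cons]
      cases hd : d.get? q.1 with
      | some v =>
        simp only []
        by_cases hv : v = q.2
        · subst hv
          simp only [bne_self_eq_false, Bool.false_eq_true, if_false, ih d, List.mem_cons]
          constructor
          · rintro ⟨p, hp, h⟩
            exact ⟨p, Or.inr hp, by tauto⟩
          · rintro ⟨p, hp, h⟩
            rcases hp with rfl | hp
            · rcases h with (h | h) | h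
              · exact absurd (congrArg Prod.snd h) (by simp)
              · exact ⟨(p.1, !p.2), h, Or.inr (by simp [hd])⟩
              · rw [hd] at h; simp at h
            · rcases h with (h | h) | h
              · -- (p.1, !p.2) = q : then d.get? p.1 = some q.2 = some (!p.2)
                refine ⟨p, hp, Or.inr ?_⟩
                subst h
                exact hd
              · exact ⟨p, hp, Or.inl h⟩
              · exact ⟨p, hp, Or.inr h⟩
        · have hbne : (v != q.2) = true := bne_iff_ne.mpr hv
          simp only [hbne, if_true, true_iff]
          refine ⟨q, List.mem_cons_self, Or.inr ?_⟩
          rw [hd]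
          congr 1
          cases hq2 : q.2 <;> simp_all
      | none =>
        simp only [ih (d.insert q.1 q.2), List.mem_cons]
        constructor
        · rintro ⟨p, hp, h⟩
          rcases h with h | h
          · exact ⟨p, Or.inr hp, Or.inl (Or.inr h)⟩
          · by_cases hpq : p.1 = q.1
            · rw [hpq, PySem.Dict.get?_insert_self] at h
              have : q.2 = !p.2 := Option.some.inj h
              refine ⟨p, Or.inr hp, Or.inl (Or.inl ?_)⟩
              exact Prod.ext hpq this.symm
            · rw [PySem.Dict.get?_insert_of_ne _ _ hpq] at h
              exact ⟨p, Or.inr hp, Or.inr h⟩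
        · rintro ⟨p, hp, h⟩
          rcases hp with rfl | hp
          · rcases h with (h | h) | h
            · exact absurd (congrArg Prod.snd h) (by simp)
            · refine ⟨(p.1, !p.2), h, Or.inr ?_⟩
              simp [PySem.Dict.get?_insert_self]
            · rw [hd] at h; simp at h
          · rcases h with (h | h) | h
            · -- (p.1,!p.2) = q : the inserted binding contradicts p
              refine ⟨p, hp, Or.inr ?_⟩
              subst h
              exact PySem.Dict.get?_insert_self ..
            · exact ⟨p, hp, Or.inl h⟩
            · have hpq : p.1 ≠ q.1 := by
                intro e; rw [e, hd] at h; simp at h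
              refine ⟨p, hp, Or.inr ?_⟩
              rw [PySem.Dict.get?_insert_of_ne _ _ hpq]
              exact h
    · have hU : unitsOf (c :: rest) = unitsOf rest := by
        simp [unitsOf, hc]
      rw [hU]
      simp only [check_contradiction_go, if_neg hc]
      exact ih d

-- ===== VERDICT (by name: the statement is the Claim_ definition above) =====
theorem check_contradiction_spec : Claim_equal_check_contradiction := by
  intro formula _
  unfold Spec_check_contradiction
  have hA := go_iff formula PySem.Dict.empty
  simp only [PySem.Dict.get?_empty] at hA
  have hB := alt_iff formula
  rw [Bool.eq_iff_iff]
  unfold check_contradiction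
  rw [hA, hB]
  simp
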